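-- pv_equiv track=rewrite | github.com/golansha/payphones | payphones.py | findMaxDistanceSet
-- ===== SOURCE A (Python) =====
-- def findMaxDistanceSet(arr, neighbor_left, neighbor_right, places):
--     farthest = []
--     maximal_distance = 0
--     for i in places:
--         if arr[i] != -1:
--             continue
--         distance = min(i - neighbor_left[i], neighbor_right[i] - i)
--         if distance == maximal_distance:
--             farthest.append(i)
--         if distance > maximal_distance:
--             maximal_distance = distance
--             farthest = [i]
--     return maximal_distance, farthest
-- ===== SOURCE B (Python) =====
-- def findMaxDistanceSet(arr, neighbor_left, neighbor_right, places):
--     dists = [(i, min(i - neighbor_left[i], neighbor_right[i] - i))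
--              for i in places if arr[i] == -1]
--     maximal_distance = max([0] + [d for _, d in dists])
--     farthest = [i for i, d in dists if d == maximal_distance]
--     return maximal_distance, farthest
-- ===== Notes on version B (the rewrite author's own statement) =====
-- stated objective: alternative
-- what changed: Replaces A's single running-max loop with mutable reset/append state by a build-table (index, min-neighbor-distance), reduce (max seeded with 0), then filter pipeline.
-- outside the precondition, e.g. on findMaxDistanceSet([-1], [0], [0], [2]): A raises IndexError, B raises IndexError
import Mathlib
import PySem

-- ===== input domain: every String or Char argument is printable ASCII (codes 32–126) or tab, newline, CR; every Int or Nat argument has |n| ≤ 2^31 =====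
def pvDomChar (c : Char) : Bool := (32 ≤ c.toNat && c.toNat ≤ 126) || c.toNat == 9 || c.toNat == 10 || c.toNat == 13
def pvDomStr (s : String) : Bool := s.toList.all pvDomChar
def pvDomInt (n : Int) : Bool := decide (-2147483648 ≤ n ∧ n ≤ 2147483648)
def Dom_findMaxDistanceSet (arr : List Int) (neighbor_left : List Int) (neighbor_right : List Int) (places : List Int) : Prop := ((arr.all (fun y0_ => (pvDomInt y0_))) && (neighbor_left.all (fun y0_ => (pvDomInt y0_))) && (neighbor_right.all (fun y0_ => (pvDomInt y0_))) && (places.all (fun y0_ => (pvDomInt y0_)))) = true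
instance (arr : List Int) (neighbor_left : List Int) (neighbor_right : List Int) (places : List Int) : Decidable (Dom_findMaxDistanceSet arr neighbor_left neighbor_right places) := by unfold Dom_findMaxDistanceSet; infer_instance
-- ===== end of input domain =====

-- B replaces A's running-max loop with mutable reset/append state by a build-table, reduce, filter pipeline (same cost, different decomposition).

-- ===== PORT A =====
def pvLoopA (arr neighbor_left neighbor_right : List Int) : List Int → Int × List Int → Int × List Int
  | [], st => st
  | i :: t, st =>
    if PySem.List.pyGetD arr i 0 ≠ -1 then
      pvLoopA arr neighbor_left neighbor_right t st
    else
      let distance := min (i - PySem.List.pyGetD neighbor_left i 0) (PySem.List.pyGetD neighbor_right i 0 - i)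
      let st1 := if distance = st.1 then (st.1, st.2 ++ [i]) else st
      let st2 := if distance > st1.1 then (distance, [i]) else st1
      pvLoopA arr neighbor_left neighbor_right t st2

def findMaxDistanceSet (arr : List Int) (neighbor_left : List Int) (neighbor_right : List Int) (places : List Int) : Int × List Int :=
  pvLoopA arr neighbor_left neighbor_right places (0, [])

-- ===== PORT B =====
def pvDists (arr neighbor_left neighbor_right : List Int) (places : List Int) : List (Int × Int) :=
  places.filterMap (fun i =>
    if PySem.List.pyGetD arr i 0 = -1 then
      some (i, min (i - PySem.List.pyGetD neighbor_left i 0) (PySem.List.pyGetD neighbor_right i 0 - i))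
    else none)

def findMaxDistanceSet_alt (arr : List Int) (neighbor_left : List Int) (neighbor_right : List Int) (places : List Int) : Int × List Int :=
  let dists := pvDists arr neighbor_left neighbor_right places
  let maximal_distance := (PySem.List.max? (0 :: dists.map Prod.snd) (fun y => y)).getD 0
  (maximal_distance, (dists.filter (fun p => p.2 = maximal_distance)).map Prod.fst)

-- ===== PRECONDITION & SPEC =====
-- Pre_ excludes exactly the inputs where Python A raises IndexError: some i in places out of range
-- for arr, or (when arr[i] == -1) out of range for neighbor_left / neighbor_right.
def Pre_findMaxDistanceSet (arr : List Int) (neighbor_left : List Int) (neighbor_right : List Int) (places : List Int) : Prop :=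
  ∀ i ∈ places, PySem.Raise.InRange arr.length i ∧
    (PySem.List.pyGet? arr i = some (-1) →
      PySem.Raise.InRange neighbor_left.length i ∧ PySem.Raise.InRange neighbor_right.length i)
instance (arr : List Int) (neighbor_left : List Int) (neighbor_right : List Int) (places : List Int) : Decidable (Pre_findMaxDistanceSet arr neighbor_left neighbor_right places) := by unfold Pre_findMaxDistanceSet; infer_instance

def pvWitness_findMaxDistanceSet : List Int × List Int × List Int × List Int :=
  ([-1, 0, -1], [0, 0, 1], [2, 2, 4], [0, 1, 2])

def Spec_findMaxDistanceSet (arr : List Int) (neighbor_left : List Int) (neighbor_right : List Int) (places : List Int) (out : Int × List Int) : Prop := out = findMaxDistanceSet_alt arr neighbor_left neighbor_right places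
instance (arr : List Int) (neighbor_left : List Int) (neighbor_right : List Int) (places : List Int) (out : Int × List Int) : Decidable (Spec_findMaxDistanceSet arr neighbor_left neighbor_right places out) := by unfold Spec_findMaxDistanceSet; infer_instance

-- ===== CLAIM (what is proved, stated in full; the proofs are below) =====
def Claim_equal_findMaxDistanceSet : Prop := ∀ (arr : List Int) (neighbor_left : List Int) (neighbor_right : List Int) (places : List Int), Dom_findMaxDistanceSet arr neighbor_left neighbor_right places → Pre_findMaxDistanceSet arr neighbor_left neighbor_right places → Spec_findMaxDistanceSet arr neighbor_left neighbor_right places (findMaxDistanceSet arr neighbor_left neighbor_right places)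

-- ===== LEMMAS AND PROOFS =====

-- A's loop, expressed over the (index, distance) pair list.
def pvLoopP : List (Int × Int) → Int × List Int → Int × List Int
  | [], st => st
  | (i, d) :: t, st =>
    let st1 := if d = st.1 then (st.1, st.2 ++ [i]) else st
    pvLoopP t (if d > st1.1 then (d, [i]) else st1)

-- running max over the distances of a pair list
def pvM (ds : List (Int × Int)) (m : Int) : Int := ds.foldl (fun a p => max a p.2) m

lemma pvM_ge (ds : List (Int × Int)) (m : Int) : m ≤ pvM ds m := by
  induction ds generalizing m with
  | nil => simp [pvM]
  | cons p t ih =>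
      calc m ≤ max m p.2 := le_max_left _ _
        _ ≤ pvM t (max m p.2) := ih _
        _ = pvM (p :: t) m := by simp [pvM, List.foldl]

lemma loopA_eq_loopP (arr nl nr : List Int) (l : List Int) (st : Int × List Int) :
    pvLoopA arr nl nr l st = pvLoopP (pvDists arr nl nr l) st := by
  induction l generalizing st with
  | nil => simp [pvLoopA, pvDists, pvLoopP]
  | cons i t ih =>
      by_cases h : PySem.List.pyGetD arr i 0 = -1
      · simp [pvLoopA, pvDists, pvLoopP, h, List.filterMap_cons, ih]
      · simp [pvLoopA, pvDists, List.filterMap_cons, h, ih]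

lemma loopP_closed (ds : List (Int × Int)) (m : Int) (f : List Int) :
    pvLoopP ds (m, f) =
      (pvM ds m,
       (if pvM ds m = m then f else []) ++ (ds.filter (fun p => p.2 = pvM ds m)).map Prod.fst) := by
  induction ds generalizing m f with
  | nil => simp [pvLoopP, pvM]
  | cons p t ih =>
      obtain ⟨i, d⟩ := p
      have hM : pvM ((i, d) :: t) m = pvM t (max m d) := by simp [pvM, List.foldl]
      by_cases hgt : d > m
      · -- d > m: running max resets to d, state becomes (d, [i])
        have h1 : pvLoopP ((i, d) :: t) (m, f) = pvLoopP t (d, [i]) := by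
          simp [pvLoopP, hgt, ne_of_gt hgt]
        have hmx : max m d = d := max_eq_right (le_of_lt hgt)
        have hge : d ≤ pvM t d := pvM_ge t d
        have hne : pvM t d ≠ m := by
          intro h; exact absurd (h ▸ hge) (not_le.mpr hgt)
        rw [h1, ih, hM, hmx]
        simp only [List.filter_cons, hne, if_neg hne]
        by_cases hd : pvM t d = d
        · simp [hd, List.filter_cons]
        · have : ¬ (d = pvM t d) := fun h => hd h.symm
          simp [hd, List.filter_cons, this]
      · -- d ≤ m: max unchanged; append i iff d = m
        have hmx : max m d = m := max_eq_left (not_lt.mp hgt)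
        have hMm : pvM ((i, d) :: t) m = pvM t m := by rw [hM, hmx]
        by_cases heq : d = m
        · have h1 : pvLoopP ((i, d) :: t) (m, f) = pvLoopP t (m, f ++ [i]) := by
            simp [pvLoopP, heq, hgt]
          rw [h1, ih, hMm]
          by_cases hm : pvM t m = m
          · have hdM : d = pvM t m := by rw [hm, heq]
            simp [hm, List.filter_cons, hdM]
          · have hdM : ¬ (d = pvM t m) := by
              intro h; exact hm (by rw [← h, heq])
            simp [hm, List.filter_cons, hdM]
        · have h1 : pvLoopP ((i, d) :: t) (m, f) = pvLoopP t (m, f) := by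
            have : ¬ d > m := hgt
            simp [pvLoopP, heq, this]
          have hdM : ¬ (d = pvM t m) := by
            intro h
            have := pvM_ge t m
            have hdm : m ≤ d := h ▸ this
            exact heq (le_antisymm (not_lt.mp hgt) hdm)
          rw [h1, ih, hMm]
          simp [List.filter_cons, hdM]

-- ===== VERDICT (by name: the statement is the Claim_ definition above) =====
theorem findMaxDistanceSet_spec : Claim_equal_findMaxDistanceSet := by
  intro arr nl nr places _ _
  unfold Spec_findMaxDistanceSet findMaxDistanceSet findMaxDistanceSet_alt
  rw [loopA_eq_loopP, loopP_closed]
  have hmax : (PySem.List.max? (0 :: (pvDists arr nl nr places).map Prod.snd) (fun y => y)).getD 0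
      = pvM (pvDists arr nl nr places) 0 := by
    rw [PySem.List.max?_id_cons]
    simp [pvM, List.foldl_map]
  simp [hmax]
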